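-- pv_equiv track=rewrite | github.com/spossner/adventofcode-2015 | 25.py | solve
-- ===== SOURCE A (Python) =====
-- def solve(row, col):
--     id = 1
--     for i in range(1, row+col-1):
--         id = id + i
--     id = id + col - 1
--
--     code = 20151125
--     for i in range(id-1):
--         code = (code * 252533) % 33554393
--
--     return code
-- ===== SOURCE B (Python) =====
-- def solve(row, col):
--     d = row + col - 2                                   # completed diagonals before the one holding (row, col)
--     idx = (d * (d + 1) // 2 if d > 0 else 0) + col      # 1-based position in the diagonal enumeration
--     return 20151125 * pow(252533, max(idx - 1, 0), 33554393) % 33554393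
-- ===== Notes on version B (the rewrite author's own statement) =====
-- stated objective: faster
-- what changed: Replaces both accumulation loops by a closed-form triangular-number index and one modular exponentiation pow(252533, idx-1, 33554393).
import Mathlib
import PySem

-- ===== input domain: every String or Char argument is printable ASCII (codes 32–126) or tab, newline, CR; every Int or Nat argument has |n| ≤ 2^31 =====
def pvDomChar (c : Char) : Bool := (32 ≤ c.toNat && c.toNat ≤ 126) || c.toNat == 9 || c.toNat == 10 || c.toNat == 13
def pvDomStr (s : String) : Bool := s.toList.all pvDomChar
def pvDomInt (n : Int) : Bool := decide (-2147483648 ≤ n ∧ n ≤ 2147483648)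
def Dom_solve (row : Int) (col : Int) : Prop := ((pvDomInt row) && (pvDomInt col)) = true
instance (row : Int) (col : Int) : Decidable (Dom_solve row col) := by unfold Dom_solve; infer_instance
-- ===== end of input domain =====

-- B replaces A's two accumulation loops by a closed-form triangular index and modular exponentiation (faster).

-- ===== PORT A =====
def solve (row : Int) (col : Int) : Int :=
  let id0 := (PySem.List.pyRange 1 (row + col - 1) 1).foldl (fun id i => id + i) 1
  let id := id0 + col - 1
  (PySem.List.pyRange 0 (id - 1) 1).foldl
    (fun code _ => PySem.Int.mod (code * 252533) 33554393) 20151125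

-- ===== PORT B =====
def solve_alt (row : Int) (col : Int) : Int :=
  let d := row + col - 2
  let idx := (if d > 0 then PySem.Int.floordiv (d * (d + 1)) 2 else 0) + col
  -- pow(252533, e, 33554393) with e = max(idx-1, 0) ≥ 0 is PySem.Int.powMod
  PySem.Int.mod (20151125 * PySem.Int.powMod 252533 (max (idx - 1) 0).toNat 33554393) 33554393

-- ===== PRECONDITION & SPEC =====
def Spec_solve (row : Int) (col : Int) (out : Int) : Prop := out = solve_alt row col
instance (row : Int) (col : Int) (out : Int) : Decidable (Spec_solve row col out) := by unfold Spec_solve; infer_instance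

-- ===== CLAIM (what is proved, stated in full; the proofs are below) =====
def Claim_equal_solve : Prop := ∀ (row : Int) (col : Int), Dom_solve row col → Spec_solve row col (solve row col)

-- ===== LEMMAS AND PROOFS =====

-- the mod-multiply loop computes (c * 252533^len) % 33554393 from a reduced start
theorem pv_modloop (l : List Int) (c : Int) :
    l.foldl (fun code _ => PySem.Int.mod (code * 252533) 33554393) (PySem.Int.mod c 33554393)
      = PySem.Int.mod (c * 252533 ^ l.length) 33554393 := by
  induction l generalizing c with
  | nil => simp
  | cons x t ih =>
    have h33 : (0 : Int) < 33554393 := by norm_num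
    have h1 : PySem.Int.mod (PySem.Int.mod c 33554393 * 252533) 33554393
        = PySem.Int.mod (c * 252533) 33554393 := by
      rw [PySem.Int.mod_eq_emod_of_pos h33, PySem.Int.mod_eq_emod_of_pos h33,
          PySem.Int.mod_eq_emod_of_pos h33]
      rw [Int.mul_emod, Int.emod_emod_of_dvd _ dvd_rfl, ← Int.mul_emod]
    simp only [List.foldl_cons, h1]
    rw [ih (c * 252533)]
    have h2 : c * 252533 * 252533 ^ t.length = c * 252533 ^ (x :: t).length := by
      rw [List.length_cons, pow_succ]
      ring
    rw [h2]

-- Gauss: twice the sum of 1..n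
theorem pv_gauss2 (n : Nat) :
    2 * ((List.range n).map (fun k : Nat => (1 : Int) + (k : Int))).sum = (n : Int) * (n + 1) := by
  induction n with
  | zero => simp
  | succ m ih =>
    rw [List.range_succ]
    simp only [List.map_append, List.sum_append, List.map_cons, List.map_nil, List.sum_cons,
      List.sum_nil]
    rw [mul_add, ih]
    push_cast
    ring

-- Gauss: sum of 1..n
theorem pv_gauss (n : Nat) :
    ((List.range n).map (fun k : Nat => (1 : Int) + (k : Int))).sum = (n : Int) * (n + 1) / 2 := by
  have h := pv_gauss2 n
  omega

-- A's first loop: the starting index of the diagonal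
theorem pv_index (b : Int) :
    (PySem.List.pyRange 1 b 1).foldl (fun id i => id + i) (1 : Int)
      = 1 + (if b - 1 > 0 then PySem.Int.floordiv ((b - 1) * b) 2 else 0) := by
  rw [show (fun (id i : Int) => id + i) = (fun acc x => acc + (fun y : Int => y) x) from rfl,
    PySem.List.foldl_add]
  rw [PySem.List.pyRange_one]
  by_cases hb : b - 1 > 0
  · simp only [hb, if_pos]
    rw [List.map_map]
    have : ((fun y : Int => y) ∘ fun k : Nat => 1 + (k : Int)) = fun k : Nat => (1 : Int) + (k : Int) := rfl
    rw [this, pv_gauss]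
    rw [PySem.Int.floordiv_eq_ediv_of_pos (by norm_num)]
    have hn : ((b - 1).toNat : Int) = b - 1 := by omega
    rw [hn]
    ring_nf
  · simp only [hb, if_false]
    have : (b - 1).toNat = 0 := by omega
    simp [this]

-- ===== VERDICT (by name: the statement is the Claim_ definition above) =====
theorem solve_spec : Claim_equal_solve := by
  intro row col _
  unfold Spec_solve solve solve_alt
  dsimp only
  rw [pv_index]
  have h33 : (0 : Int) < 33554393 := by norm_num
  set T : Int := (if row + col - 1 - 1 > 0 then
      PySem.Int.floordiv ((row + col - 1 - 1) * (row + col - 1)) 2 else 0) with hT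
  have hT2 : (if row + col - 2 > 0 then
      PySem.Int.floordiv ((row + col - 2) * (row + col - 2 + 1)) 2 else 0) = T := by
    rw [hT]
    have h1 : row + col - 1 - 1 = row + col - 2 := by ring
    have h2 : row + col - 2 + 1 = row + col - 1 := by ring
    rw [h1, h2]
  rw [hT2]
  set id : Int := 1 + T + col - 1 with hid
  have hml := pv_modloop (PySem.List.pyRange 0 (id - 1) 1) 20151125
  have h0 : PySem.Int.mod 20151125 33554393 = 20151125 := by decide
  rw [h0] at hml
  rw [hml, PySem.List.length_pyRange_one]
  have hidx : T + col - 1 = id - 1 := by omega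
  rw [hidx]
  have he : (max (id - 1) 0).toNat = (id - 1 - 0).toNat := by omega
  rw [he, PySem.Int.powMod_eq]
  rw [PySem.Int.mod_eq_emod_of_pos h33, PySem.Int.mod_eq_emod_of_pos h33,
      PySem.Int.mod_eq_emod_of_pos h33]
  conv_rhs => rw [Int.mul_emod, Int.emod_emod_of_dvd _ dvd_rfl, ← Int.mul_emod]
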